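-- pv_equiv track=rewrite | github.com/htreidel/intro2cs | ex4/hangman1.py | filter_words_list
-- ===== SOURCE A (Python) =====
-- START_COUNT = 0
--
-- def filter_words_list(words, pattern, wrong_guess_lst):
--     """recieves a list of words, a word pattern and a list, input
--        must be either lowercase alphabet characters or "_" in all
--        objects, will return a list with all possible words from first
--        list that can possibly fit pattern"""
--     length_filter = set()
--     wrong_guess_filter = set()
--     final_filter = set()
--     for i in words:
--         if len(i) == len(pattern):
--             length_filter.add(i)
--     for i in length_filter:
--         counter = START_COUNT
--         for j in i:
--             if j not in wrong_guess_lst: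
--                 counter += 1
--         if counter == len(i):
--             wrong_guess_filter.add(i)
--     for i in wrong_guess_filter:
--         counter = START_COUNT
--         for j in range(len(i)):
--             if i[j] == pattern[j] or pattern[j] == "_":
--                 counter += 1
--         if counter == len(i):
--             final_filter.add(i)
--     return final_filter
-- ===== SOURCE B (Python) =====
-- def filter_words_list(words, pattern, wrong_guess_lst):
--     def matches(w, p):
--         it = iter(p)
--         for c in w:
--             pc = next(it, None)
--             if pc is None:
--                 return False
--             if c in wrong_guess_lst:
--                 return False
--             if not (c == pc or pc == "_"):
--                 return False
--         return next(it, None) is None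
--     return {w for w in words if matches(w, pattern)}
-- ===== Notes on version B (the rewrite author's own statement) =====
-- stated objective: alternative
-- what changed: Replaces the three staged counting passes over intermediate sets by a single walk over each word paired with an iterator over the pattern: each step checks one character (pattern not exhausted, not a wrong guess, equals the pattern char or '_') with early exit, and length equality is iterator exhaustion instead of len(); no counters and no intermediate sets.
import Mathlib
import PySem

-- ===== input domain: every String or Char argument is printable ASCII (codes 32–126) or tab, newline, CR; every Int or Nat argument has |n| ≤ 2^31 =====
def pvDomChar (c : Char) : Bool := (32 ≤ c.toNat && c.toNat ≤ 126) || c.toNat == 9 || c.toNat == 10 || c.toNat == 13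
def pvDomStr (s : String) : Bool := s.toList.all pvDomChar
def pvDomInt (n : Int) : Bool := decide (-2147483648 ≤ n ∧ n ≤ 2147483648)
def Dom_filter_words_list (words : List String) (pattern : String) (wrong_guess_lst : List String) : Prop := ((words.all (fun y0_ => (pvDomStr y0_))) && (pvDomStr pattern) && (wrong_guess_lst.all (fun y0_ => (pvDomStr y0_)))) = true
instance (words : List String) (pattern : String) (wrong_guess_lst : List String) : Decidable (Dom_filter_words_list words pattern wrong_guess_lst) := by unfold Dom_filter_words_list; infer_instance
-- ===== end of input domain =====

-- B replaces A's three staged counting passes by one short-circuiting walk over each word paired with a pattern iterator (length = iterator exhaustion, no len/counters) (objective: alternative).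


-- ===== PORT A =====
def filter_words_list (words : List String) (pattern : String) (wrong_guess_lst : List String) : List String :=
  let length_filter : PySem.Set String :=
    words.foldl (fun s i =>
      if PySem.Str.len i = PySem.Str.len pattern then PySem.Set.add s i else s) PySem.Set.empty
  let wrong_guess_filter : PySem.Set String :=
    length_filter.foldl (fun s i =>
      let counter : Int :=
        i.toList.foldl (fun c j =>
          if String.ofList [j] ∉ wrong_guess_lst then c + 1 else c) 0
      if counter = PySem.Str.len i then PySem.Set.add s i else s) PySem.Set.empty
  let final_filter : PySem.Set String :=
    wrong_guess_filter.foldl (fun s i =>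
      let counter : Int :=
        (PySem.List.pyRange 0 (PySem.Str.len i) 1).foldl (fun c j =>
          if PySem.List.pyGetD i.toList j ' ' = PySem.List.pyGetD pattern.toList j ' '
             ∨ PySem.List.pyGetD pattern.toList j ' ' = '_' then c + 1 else c) 0
      if counter = PySem.Str.len i then PySem.Set.add s i else s) PySem.Set.empty
  final_filter

-- ===== PORT B =====
-- Source B's inner `matches`: the loop over w paired with an iterator over p, as the obvious
-- structural recursion on both lists (early exits = the false branches; exhaustion checks = the nil cases).
def pvMatches (wrong_guess_lst : List String) : List Char → List Char → Bool
  | [], [] => true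
  | [], _ :: _ => false
  | _ :: _, [] => false
  | c :: w, p :: ps =>
      !(decide (String.ofList [c] ∈ wrong_guess_lst))
        && (c == p || p == '_')
        && pvMatches wrong_guess_lst w ps

def filter_words_list_alt (words : List String) (pattern : String) (wrong_guess_lst : List String) : List String :=
  words.foldl (fun r w =>
    if pvMatches wrong_guess_lst w.toList pattern.toList then PySem.Set.add r w else r)
    PySem.Set.empty

-- ===== PRECONDITION & SPEC =====
def Spec_filter_words_list (words : List String) (pattern : String) (wrong_guess_lst : List String) (out : List String) : Prop := out = filter_words_list_alt words pattern wrong_guess_lst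
instance (words : List String) (pattern : String) (wrong_guess_lst : List String) (out : List String) : Decidable (Spec_filter_words_list words pattern wrong_guess_lst out) := by unfold Spec_filter_words_list; infer_instance

-- ===== CLAIM (what is proved, stated in full; the proofs are below) =====
def Claim_equal_filter_words_list : Prop := ∀ (words : List String) (pattern : String) (wrong_guess_lst : List String), Dom_filter_words_list words pattern wrong_guess_lst → Spec_filter_words_list words pattern wrong_guess_lst (filter_words_list words pattern wrong_guess_lst)

-- ===== LEMMAS AND PROOFS =====

-- A conditional-add fold is the plain Set fold over the filtered list.
theorem pv_foldl_if_add {α : Type} [DecidableEq α] (p : α → Prop) [DecidablePred p] :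
    ∀ (l acc : List α),
      l.foldl (fun s i => if p i then PySem.Set.add s i else s) acc
        = (l.filter (fun i => decide (p i))).foldl PySem.Set.add acc := by
  intro l
  induction l with
  | nil => intro acc; rfl
  | cons x l ih =>
      intro acc
      by_cases h : p x <;> simp [h, ih]

-- filter commutes with the Set-building fold.
theorem pv_filter_foldl_add {α : Type} [DecidableEq α] (q : α → Bool) :
    ∀ (l acc : List α),
      (l.foldl PySem.Set.add acc).filter q
        = (l.filter q).foldl PySem.Set.add (acc.filter q) := by
  intro l
  induction l with
  | nil => intro acc; rfl
  | cons x l ih =>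
      intro acc
      have hstep : (PySem.Set.add acc x).filter q
          = if q x then PySem.Set.add (acc.filter q) x else acc.filter q := by
        by_cases hq : q x = true
        · by_cases hc : x ∈ acc
          · simp [PySem.Set.add, PySem.Set.contains, hc, hq, List.mem_filter]
          · simp [PySem.Set.add, PySem.Set.contains, hc, hq, List.filter_append, List.mem_filter]
        · by_cases hc : x ∈ acc
          · simp [PySem.Set.add, PySem.Set.contains, hc, hq]
          · simp [PySem.Set.add, PySem.Set.contains, hc, hq, List.filter_append]
      by_cases hq : q x = true <;>
        simp [List.foldl_cons, hq, ih, hstep]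

-- folding Set.add over a list that is fresh w.r.t. the accumulator just appends it.
theorem pv_foldl_add_nodup {α : Type} [DecidableEq α] :
    ∀ (l acc : List α), (acc ++ l).Nodup → l.foldl PySem.Set.add acc = acc ++ l := by
  intro l
  induction l with
  | nil => intro acc _; simp
  | cons x l ih =>
      intro acc h
      have hx : x ∉ acc := fun hm =>
        (List.disjoint_of_nodup_append h) hm (by simp)
      have hadd : PySem.Set.add acc x = acc ++ [x] := by
        simp [PySem.Set.add, PySem.Set.contains, hx]
      have h' : ((acc ++ [x]) ++ l).Nodup := by simpa using h
      simp [hadd, ih (acc ++ [x]) h']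

-- the Set-building fold preserves Nodup.
theorem pv_nodup_foldl_add {α : Type} [DecidableEq α] :
    ∀ (l acc : List α), acc.Nodup → (l.foldl PySem.Set.add acc).Nodup := by
  intro l
  induction l with
  | nil => intro acc h; simpa using h
  | cons x l ih =>
      intro acc h
      have hstep : (PySem.Set.add acc x).Nodup := by
        by_cases hc : x ∈ acc
        · simpa [PySem.Set.add, PySem.Set.contains, hc] using h
        · have happ : (acc ++ [x]).Nodup := by
            rw [List.nodup_append]
            refine ⟨h, List.nodup_singleton x, ?_⟩
            intro a ha bb hb
            rw [List.mem_singleton] at hb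
            subst hb
            exact fun heq => hc (heq ▸ ha)
          simpa [PySem.Set.add, PySem.Set.contains, hc] using happ
      simpa using ih _ hstep

-- counting fold = countP.
theorem pv_foldl_count {α : Type} (p : α → Prop) [DecidablePred p] :
    ∀ (l : List α) (c : Int),
      l.foldl (fun c j => if p j then c + 1 else c) c
        = c + (l.countP (fun j => decide (p j)) : Int) := by
  intro l
  induction l with
  | nil => intro c; simp
  | cons x l ih =>
      intro c
      by_cases h : p x <;> simp [h, ih] <;> ring

-- positional count over indices = count over the zip, when lengths agree.
theorem pv_range_countP_zip (P : Char → Char → Prop) [DecidableRel P] (d : Char) :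
    ∀ (xs ys : List Char), xs.length = ys.length →
      (List.range xs.length).countP (fun j => decide (P (xs.getD j d) (ys.getD j d)))
        = (xs.zip ys).countP (fun pr => decide (P pr.1 pr.2)) := by
  intro xs
  induction xs with
  | nil => intro ys h; simp
  | cons x xs ih =>
      intro ys h
      cases ys with
      | nil => simp at h
      | cons y ys =>
          have hlen : xs.length = ys.length := by simpa using h
          rw [List.length_cons, List.range_succ_eq_map, List.countP_cons, List.countP_map]
          have hcomp : ((fun j => decide (P ((x :: xs).getD j d) ((y :: ys).getD j d))) ∘ Nat.succ)
              = fun j => decide (P (xs.getD j d) (ys.getD j d)) := by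
            funext j
            simp [Function.comp, List.getD_cons_succ]
          rw [hcomp, ih ys hlen, List.zip_cons_cons, List.countP_cons]
          simp [List.getD_cons_zero]

-- second-stage condition, pointwise.
theorem pv_pB_iff (wrong_guess_lst : List String) (i : String) :
    ((i.toList.foldl (fun c j => if String.ofList [j] ∉ wrong_guess_lst then c + 1 else c) (0 : Int))
        = PySem.Str.len i)
      ↔ ∀ c ∈ i.toList, String.ofList [c] ∉ wrong_guess_lst := by
  rw [pv_foldl_count (fun j => String.ofList [j] ∉ wrong_guess_lst) i.toList 0,
    PySem.Str.len_eq]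
  have key := List.countP_eq_length (l := i.toList)
    (p := fun j => decide (String.ofList [j] ∉ wrong_guess_lst))
  constructor
  · intro hcase c hc
    have := key.mp (by omega) c hc
    simpa using this
  · intro hall
    have := key.mpr (fun c hc => by simpa using hall c hc)
    omega

-- third-stage condition, pointwise, for words of the pattern's length.
theorem pv_pC_iff (pattern i : String) (h : i.toList.length = pattern.toList.length) :
    ((PySem.List.pyRange 0 (PySem.Str.len i) 1).foldl (fun c j =>
        if PySem.List.pyGetD i.toList j ' ' = PySem.List.pyGetD pattern.toList j ' '
            ∨ PySem.List.pyGetD pattern.toList j ' ' = '_' then c + 1 else c) 0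
        = PySem.Str.len i)
      ↔ ∀ pr ∈ i.toList.zip pattern.toList, pr.1 = pr.2 ∨ pr.2 = '_' := by
  rw [PySem.Str.len_eq, PySem.List.pyRange_zero_natCast, List.foldl_map,
    pv_foldl_count (fun j : Nat =>
      PySem.List.pyGetD i.toList (j : Int) ' ' = PySem.List.pyGetD pattern.toList (j : Int) ' '
        ∨ PySem.List.pyGetD pattern.toList (j : Int) ' ' = '_') (List.range i.toList.length) 0]
  simp only [PySem.List.pyGetD_natCast]
  rw [pv_range_countP_zip (fun a b => a = b ∨ b = '_') ' ' i.toList pattern.toList h]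
  have key := List.countP_eq_length (l := i.toList.zip pattern.toList)
    (p := fun pr => decide (pr.1 = pr.2 ∨ pr.2 = '_'))
  have hzlen : (i.toList.zip pattern.toList).length = i.toList.length := by
    rw [List.length_zip, h, min_self]
  constructor
  · intro hcnt pr hpr
    have := key.mp (by omega) pr hpr
    simpa using this
  · intro hall
    have := key.mpr (fun pr hpr => by simpa using hall pr hpr)
    omega

-- characterisation of B's recursive walk.
theorem pv_matches_iff (wrong_guess_lst : List String) :
    ∀ (xs ys : List Char),
      pvMatches wrong_guess_lst xs ys = true
        ↔ xs.length = ys.length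
          ∧ (∀ c ∈ xs, String.ofList [c] ∉ wrong_guess_lst)
          ∧ (∀ pr ∈ xs.zip ys, pr.1 = pr.2 ∨ pr.2 = '_') := by
  intro xs
  induction xs with
  | nil => intro ys; cases ys <;> simp [pvMatches]
  | cons c w ih =>
      intro ys
      cases ys with
      | nil => simp [pvMatches]
      | cons p ps =>
          simp only [pvMatches, Bool.and_eq_true, Bool.not_eq_true', Bool.or_eq_true,
            beq_iff_eq, decide_eq_false_iff_not, ih ps, List.zip_cons_cons,
            List.length_cons, List.mem_cons]
          constructor
          · rintro ⟨⟨hni, hpos⟩, hlen, hw, hz⟩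
            refine ⟨by omega, ?_, ?_⟩
            · rintro x (rfl | hx)
              · exact hni
              · exact hw x hx
            · rintro pr (rfl | hpr)
              · exact hpos
              · exact hz pr hpr
          · rintro ⟨hlen, hw, hz⟩
            exact ⟨⟨hw c (Or.inl rfl), hz (c, p) (Or.inl rfl)⟩, by omega,
              fun x hx => hw x (Or.inr hx), fun pr hpr => hz pr (Or.inr hpr)⟩

-- helper naming A's per-stage loop shape (used only by the proofs).
def pv_stage {α : Type} [DecidableEq α] (p : α → Prop) [DecidablePred p] (l : List α) : List α :=
  l.foldl (fun s i => if p i then PySem.Set.add s i else s) PySem.Set.empty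

-- three staged conditional-add passes equal one pass with the conjoined condition.
theorem pv_three_stage {α : Type} [DecidableEq α] (a b c q : α → Prop)
    [DecidablePred a] [DecidablePred b] [DecidablePred c] [DecidablePred q]
    (hq : ∀ x, (a x ∧ b x ∧ c x) ↔ q x) (w : List α) :
    pv_stage c (pv_stage b (pv_stage a w)) = pv_stage q w := by
  have hE : (PySem.Set.empty : List α) = [] := rfl
  simp only [pv_stage, hE]
  rw [pv_foldl_if_add a w, pv_foldl_if_add b, pv_foldl_if_add c, pv_foldl_if_add q w]
  rw [pv_filter_foldl_add (fun i => decide (b i)) (w.filter fun i => decide (a i)) []]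
  rw [List.filter_nil]
  set FB := ((w.filter fun i => decide (a i)).filter fun i => decide (b i)) with hFB
  have h2 : (FB.foldl PySem.Set.add []).Nodup := pv_nodup_foldl_add FB [] List.nodup_nil
  rw [pv_foldl_add_nodup (FB.foldl PySem.Set.add []) []
    (by rw [List.nil_append]; exact h2)]
  rw [List.nil_append]
  rw [pv_filter_foldl_add (fun i => decide (c i)) FB []]
  rw [List.filter_nil]
  set FC := FB.filter fun i => decide (c i) with hFC
  have h3 : (FC.foldl PySem.Set.add []).Nodup := pv_nodup_foldl_add FC [] List.nodup_nil
  rw [pv_foldl_add_nodup (FC.foldl PySem.Set.add []) []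
    (by rw [List.nil_append]; exact h3)]
  rw [List.nil_append]
  rw [hFC, hFB, List.filter_filter, List.filter_filter]
  congr 1
  apply List.filter_congr
  intro x _
  rw [Bool.eq_iff_iff]
  simp only [Bool.and_eq_true, decide_eq_true_iff]
  constructor
  · rintro ⟨⟨h3, h2⟩, h1⟩
    exact (hq x).mp ⟨h1, h2, h3⟩
  · intro hx
    obtain ⟨h1, h2, h3⟩ := (hq x).mpr hx
    exact ⟨⟨h3, h2⟩, h1⟩

-- A's three per-word stage conditions conjoined are exactly B's recursive-walk test.
theorem pv_pointwise (pattern : String) (wrong_guess_lst : List String) (x : String) :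
    (PySem.Str.len x = PySem.Str.len pattern
      ∧ (x.toList.foldl (fun c j => if String.ofList [j] ∉ wrong_guess_lst then c + 1 else c) (0 : Int))
          = PySem.Str.len x
      ∧ (PySem.List.pyRange 0 (PySem.Str.len x) 1).foldl (fun c j =>
            if PySem.List.pyGetD x.toList j ' ' = PySem.List.pyGetD pattern.toList j ' '
                ∨ PySem.List.pyGetD pattern.toList j ' ' = '_' then c + 1 else c) 0
          = PySem.Str.len x)
    ↔ pvMatches wrong_guess_lst x.toList pattern.toList = true := by
  rw [pv_matches_iff]
  constructor
  · rintro ⟨h1, h2, h3⟩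
    have hlen : x.toList.length = pattern.toList.length := by
      have := h1; rw [PySem.Str.len_eq, PySem.Str.len_eq] at this; exact_mod_cast this
    exact ⟨hlen, (pv_pB_iff wrong_guess_lst x).mp h2, (pv_pC_iff pattern x hlen).mp h3⟩
  · rintro ⟨hlen, h2, h3⟩
    have h1 : PySem.Str.len x = PySem.Str.len pattern := by
      rw [PySem.Str.len_eq, PySem.Str.len_eq]; exact_mod_cast hlen
    exact ⟨h1, (pv_pB_iff wrong_guess_lst x).mpr h2, (pv_pC_iff pattern x hlen).mpr h3⟩

-- ===== VERDICT (by name: the statement is the Claim_ definition above) =====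
theorem filter_words_list_spec : Claim_equal_filter_words_list := by
  intro words pattern wrong_guess_lst _
  show filter_words_list words pattern wrong_guess_lst
      = filter_words_list_alt words pattern wrong_guess_lst
  show pv_stage
      (fun i => (PySem.List.pyRange 0 (PySem.Str.len i) 1).foldl (fun c j =>
          if PySem.List.pyGetD i.toList j ' ' = PySem.List.pyGetD pattern.toList j ' '
              ∨ PySem.List.pyGetD pattern.toList j ' ' = '_' then c + 1 else c) 0
        = PySem.Str.len i)
      (pv_stage
        (fun i => (i.toList.foldl (fun c j => if String.ofList [j] ∉ wrong_guess_lst then c + 1 else c) (0 : Int))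
          = PySem.Str.len i)
        (pv_stage (fun i => PySem.Str.len i = PySem.Str.len pattern) words))
    = pv_stage (fun w => pvMatches wrong_guess_lst w.toList pattern.toList = true) words
  exact pv_three_stage _ _ _ _ (fun x => pv_pointwise pattern wrong_guess_lst x) words
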